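-- pv_equiv track=rewrite | github.com/Pet3r1512/Leetcode | #2511.MaximumEnemyFortsThatCanBeCaptured/2511.py | captureForts
-- ===== SOURCE A (Python) =====
-- from typing import List
--
-- def captureForts(forts: List[int]) -> int:
--     r, i = 0, 0
--
--     while i < len(forts) - 1:
--         if forts[i] == 1:
--             for j in range(i + 1, len(forts)):
--                 if forts[j] == -1:
--                     if all(f == 0 for f in forts[i + 1: j]):
--                         r = max(j - i - 1, r)
--                     break
--                 elif forts[j] != 0:
--                     break
--         elif forts[i] == -1:
--             for j in range(i + 1, len(forts)):
--                 if forts[j] == 1: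
--                     if all(f == 0 for f in forts[i + 1: j]):
--                         r = max(j - i - 1, r)
--                     break
--                 elif forts[j] != 0:
--                     break
--
--         i += 1
--
--     return r
-- ===== SOURCE B (Python) =====
-- from typing import List
--
-- def captureForts(forts: List[int]) -> int:
--     best = 0
--     last = None  # index of the most recent nonzero fort seen
--     j = 0
--     while j < len(forts):
--         f = forts[j]
--         if f != 0:
--             if last is not None and (f == 1 or f == -1) and forts[last] == -f:
--                 best = max(best, j - last - 1)
--             last = j
--         j += 1
--     return best
-- ===== Notes on version B (the rewrite author's own statement) =====
-- stated objective: simpler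
-- what changed: Replaced A's nested scans (for every fort, rescan forward to the next nonzero and re-check the gap with an all-zero slice test) by a single left-to-right pass that remembers the index of the last nonzero fort and updates the maximum gap whenever a fort of one army follows one of the opposing army.
import Mathlib
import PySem

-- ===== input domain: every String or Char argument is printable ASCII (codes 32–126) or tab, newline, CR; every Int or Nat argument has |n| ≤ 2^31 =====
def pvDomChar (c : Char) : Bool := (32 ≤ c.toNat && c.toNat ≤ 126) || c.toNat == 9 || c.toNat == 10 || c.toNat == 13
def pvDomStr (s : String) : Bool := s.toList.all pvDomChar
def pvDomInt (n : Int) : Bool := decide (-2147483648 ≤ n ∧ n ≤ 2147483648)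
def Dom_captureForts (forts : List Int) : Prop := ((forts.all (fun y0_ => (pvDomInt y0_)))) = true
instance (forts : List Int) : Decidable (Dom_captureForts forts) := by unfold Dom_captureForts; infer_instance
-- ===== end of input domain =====

-- B is a simpler single pass that remembers the last nonzero fort, replacing A's nested forward scans; return values proved equal.

-- ===== PORT A =====
-- inner 'for j in range(s, len(forts))' loop of A; v = forts[i] (1 or -1), so 'forts[j] == -1'
-- resp. 'forts[j] == 1' is 'forts[j] == -v' in both branches (branch order preserved).
def aInner (forts : List Int) (v : Int) (i s : Nat) (r : Int) : Int :=
  if _h : s < forts.length then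
    if forts.getD s 0 = -v then
      if (PySem.List.slice forts (some ((i + 1 : Nat) : Int)) (some ((s : Nat) : Int))).all (fun f => f == 0) then
        max ((s : Int) - (i : Int) - 1) r
      else r
    else if forts.getD s 0 ≠ 0 then r
    else aInner forts v i (s + 1) r
  else r
termination_by forts.length - s

-- outer 'while i < len(forts) - 1' loop of A (on Python ints, i < len - 1 ⟺ i + 1 < len)
def aOuter (forts : List Int) (i : Nat) (r : Int) : Int :=
  if _h : i + 1 < forts.length then
    aOuter forts (i + 1)
      (if forts.getD i 0 = 1 then aInner forts 1 i (i + 1) r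
       else if forts.getD i 0 = -1 then aInner forts (-1) i (i + 1) r
       else r)
  else r
termination_by forts.length - i

def captureForts (forts : List Int) : Int := aOuter forts 0 0

-- ===== PORT B =====
-- B's 'while j < len(forts)' loop: last = index of the most recent nonzero fort (None at start)
def bFrom (forts : List Int) (j : Nat) (last : Option Nat) (best : Int) : Int :=
  if _h : j < forts.length then
    if forts.getD j 0 ≠ 0 then
      match last with
      | some i =>
          bFrom forts (j + 1) (some j)
            (if (forts.getD j 0 = 1 ∨ forts.getD j 0 = -1) ∧ forts.getD i 0 = -(forts.getD j 0)
             then max best ((j : Int) - (i : Int) - 1) else best)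
      | none => bFrom forts (j + 1) (some j) best
    else bFrom forts (j + 1) last best
  else best
termination_by forts.length - j

def captureForts_alt (forts : List Int) : Int := bFrom forts 0 none 0

-- ===== PRECONDITION & SPEC =====
def Spec_captureForts (forts : List Int) (out : Int) : Prop := out = captureForts_alt forts
instance (forts : List Int) (out : Int) : Decidable (Spec_captureForts forts out) := by unfold Spec_captureForts; infer_instance

-- ===== CLAIM (what is proved, stated in full; the proofs are below) =====
def Claim_equal_captureForts : Prop := ∀ (forts : List Int), Dom_captureForts forts → Spec_captureForts forts (captureForts forts)

-- ===== LEMMAS AND PROOFS =====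

-- the slice forts[i+1:j] that A checks is all-zero, under the zeros-between hypothesis
theorem sliceAllZero (forts : List Int) (i j : Nat) (hij : i < j)
    (hz : ∀ k, i < k → k < j → forts.getD k 0 = 0) :
    (PySem.List.slice forts (some ((i + 1 : Nat) : Int)) (some ((j : Nat) : Int))).all
      (fun f => f == 0) = true := by
  rw [PySem.List.slice_natCast, List.all_eq_true]
  intro x hx
  obtain ⟨t, ht, rfl⟩ := List.mem_iff_getElem.mp hx
  have hb : t < j - (i + 1) ∧ i + 1 + t < forts.length := by
    simp only [List.length_take, List.length_drop, lt_min_iff] at ht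
    omega
  have hg : ((forts.drop (i + 1)).take (j - (i + 1)))[t] = forts[i + 1 + t]'hb.2 := by
    rw [List.getElem_take, List.getElem_drop]
  have hk := hz (i + 1 + t) (by omega) (by omega)
  rw [List.getD_eq_getElem forts 0 hb.2] at hk
  simp [hg, hk]

-- A's inner scan, arriving at the first nonzero position j
theorem aInner_at_j (forts : List Int) (v : Int) (i j : Nat)
    (hj : j < forts.length) (hnz : forts.getD j 0 ≠ 0)
    (hz : ∀ k, i < k → k < j → forts.getD k 0 = 0) (hij : i < j) (r : Int) :
    aInner forts v i j r =
      if forts.getD j 0 = -v then max ((j : Int) - (i : Int) - 1) r else r := by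
  rw [aInner, dif_pos hj]
  by_cases hx : forts.getD j 0 = -v
  · rw [if_pos hx, if_pos hx, sliceAllZero forts i j hij hz, if_pos rfl]
  · rw [if_neg hx, if_neg hx, if_pos hnz]

-- A's inner scan over zeros up to the first nonzero position j
theorem aInner_find (forts : List Int) (v : Int) (hv : v ≠ 0) (i j : Nat)
    (hj : j < forts.length) (hnz : forts.getD j 0 ≠ 0)
    (hz : ∀ k, i < k → k < j → forts.getD k 0 = 0) (hij : i < j) :
    ∀ d s r, j - s ≤ d → i < s → s ≤ j →
      aInner forts v i s r =
        if forts.getD j 0 = -v then max ((j : Int) - (i : Int) - 1) r else r := by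
  intro d
  induction d with
  | zero =>
    intro s r hd h1 h2
    have hsj : s = j := by omega
    subst hsj
    exact aInner_at_j forts v i _ hj hnz hz hij r
  | succ d ih =>
    intro s r hd h1 h2
    by_cases hsj : s = j
    · subst hsj
      exact aInner_at_j forts v i _ hj hnz hz hij r
    · have hs : s < j := by omega
      have h0 := hz s h1 hs
      rw [aInner, dif_pos (by omega : s < forts.length), h0,
        if_neg (by omega : ¬ (0 : Int) = -v), if_neg (by simp : ¬ (0 : Int) ≠ 0)]
      exact ih (s + 1) r (by omega) (by omega) (by omega)

-- A's inner scan when everything from s to the end is zero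
theorem aInner_zeros (forts : List Int) (v : Int) (hv : v ≠ 0) (i : Nat) :
    ∀ d s r, forts.length - s ≤ d →
      (∀ k, s ≤ k → k < forts.length → forts.getD k 0 = 0) →
      aInner forts v i s r = r := by
  intro d
  induction d with
  | zero =>
    intro s r hd hz
    rw [aInner, dif_neg (by omega)]
  | succ d ih =>
    intro s r hd hz
    rw [aInner]
    by_cases hs : s < forts.length
    · rw [dif_pos hs, hz s le_rfl hs, if_neg (by omega : ¬ (0 : Int) = -v),
        if_neg (by simp : ¬ (0 : Int) ≠ 0)]
      exact ih (s + 1) r (by omega) (fun k hk1 hk2 => hz k (by omega) hk2)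
    · rw [dif_neg hs]

-- A's outer loop over a block of zeros
theorem aOuter_skip (forts : List Int) (b : Nat) (hb : b ≤ forts.length) :
    ∀ d i r, b - i ≤ d → i ≤ b →
      (∀ k, i ≤ k → k < b → forts.getD k 0 = 0) →
      aOuter forts i r = aOuter forts b r := by
  intro d
  induction d with
  | zero =>
    intro i r hd hib hz
    have : i = b := by omega
    subst this; rfl
  | succ d ih =>
    intro i r hd hib hz
    by_cases hibe : i = b
    · subst hibe; rfl
    · have hib' : i < b := by omega
      have h0 := hz i le_rfl hib'
      rw [aOuter]
      by_cases hc : i + 1 < forts.length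
      · rw [dif_pos hc, h0, if_neg (by omega : ¬ (0 : Int) = 1),
          if_neg (by omega : ¬ (0 : Int) = -1)]
        exact ih (i + 1) r (by omega) (by omega) (fun k hk1 hk2 => hz k (by omega) hk2)
      · rw [dif_neg hc]
        have hbe : b = i + 1 := by omega
        subst hbe
        rw [aOuter, dif_neg (by omega)]

-- B's loop over a block of zeros
theorem bFrom_skip (forts : List Int) (b : Nat) (hb : b ≤ forts.length) :
    ∀ d j last best, b - j ≤ d → j ≤ b →
      (∀ k, j ≤ k → k < b → forts.getD k 0 = 0) →
      bFrom forts j last best = bFrom forts b last best := by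
  intro d
  induction d with
  | zero =>
    intro j last best hd hjb hz
    have : j = b := by omega
    subst this; rfl
  | succ d ih =>
    intro j last best hd hjb hz
    by_cases hjbe : j = b
    · subst hjbe; rfl
    · have hjb' : j < b := by omega
      have h0 := hz j le_rfl hjb'
      rw [bFrom.eq_def, dif_pos (by omega : j < forts.length), if_neg (by simpa using h0)]
      exact ih (j + 1) last best (by omega) (by omega) (fun k hk1 hk2 => hz k (by omega) hk2)

-- B's loop at the end of the list
theorem bFrom_end (forts : List Int) (last : Option Nat) (best : Int) :
    bFrom forts forts.length last best = best := by
  rw [bFrom.eq_def, dif_neg (by omega)]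

-- the accumulator update A performs at nonzero i (first nonzero after it at j)
-- equals the update B performs when it reaches j with last = i
theorem update_eq (x f r g : Int) :
    (if x = 1 then (if f = -1 then max g r else r)
      else if x = -1 then (if f = 1 then max g r else r)
      else r) =
    (if (f = 1 ∨ f = -1) ∧ x = -f then max r g else r) := by
  split_ifs <;> first | rfl | (exfalso; omega) | rw [max_comm]

-- main correspondence: from a nonzero position i, A's outer loop from i equals
-- B's loop from i+1 with last = i, on the same accumulator
theorem main_corr (forts : List Int) :
    ∀ d i r, forts.length - i ≤ d → i < forts.length → forts.getD i 0 ≠ 0 →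
      aOuter forts i r = bFrom forts (i + 1) (some i) r := by
  intro d
  induction d with
  | zero => intro i r hd hi _; omega
  | succ d ih =>
    intro i r hd hi hnz
    by_cases hex : ∃ j, (i < j ∧ j < forts.length) ∧ forts.getD j 0 ≠ 0
    · have hspec := Nat.find_spec hex
      obtain ⟨⟨hij, hjlen⟩, hjnz⟩ := hspec
      have hz : ∀ k, i < k → k < Nat.find hex → forts.getD k 0 = 0 := by
        intro k hk1 hk2
        by_contra hne
        exact Nat.find_min hex hk2 ⟨⟨hk1, by omega⟩, hne⟩
      set j := Nat.find hex with hjdef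
      have hc : i + 1 < forts.length := by omega
      have hA1 : aInner forts 1 i (i + 1) r =
          if forts.getD j 0 = -1 then max ((j : Int) - (i : Int) - 1) r else r := by
        have := aInner_find forts 1 one_ne_zero i j hjlen hjnz hz hij
          (j - (i + 1)) (i + 1) r (by omega) (by omega) (by omega)
        simpa using this
      have hA2 : aInner forts (-1) i (i + 1) r =
          if forts.getD j 0 = 1 then max ((j : Int) - (i : Int) - 1) r else r := by
        have := aInner_find forts (-1) (by norm_num) i j hjlen hjnz hz hij
          (j - (i + 1)) (i + 1) r (by omega) (by omega) (by omega)
        simpa using this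
      have hBside : bFrom forts (i + 1) (some i) r =
          bFrom forts (j + 1) (some j)
            (if (forts.getD j 0 = 1 ∨ forts.getD j 0 = -1) ∧
                forts.getD i 0 = -(forts.getD j 0)
              then max r ((j : Int) - (i : Int) - 1) else r) := by
        rw [bFrom_skip forts j (by omega) (j - (i + 1)) (i + 1) (some i) r (by omega)
          (by omega) (fun k hk1 hk2 => hz k (by omega) hk2)]
        rw [bFrom.eq_def, dif_pos hjlen, if_pos hjnz]
      rw [hBside, aOuter, dif_pos hc, hA1, hA2,
        update_eq (forts.getD i 0) (forts.getD j 0) r ((j : Int) - (i : Int) - 1)]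
      rw [aOuter_skip forts j (by omega) (j - (i + 1)) (i + 1) _ (by omega) (by omega)
        (fun k hk1 hk2 => hz k (by omega) hk2)]
      exact ih j _ (by omega) hjlen hjnz
    · push_neg at hex
      have hzall : ∀ k, i + 1 ≤ k → k < forts.length → forts.getD k 0 = 0 := by
        intro k hk1 hk2
        exact hex k ⟨by omega, hk2⟩
      have hB : bFrom forts (i + 1) (some i) r = r := by
        rw [bFrom_skip forts forts.length le_rfl (forts.length - (i + 1)) (i + 1) (some i) r
          (by omega) (by omega) hzall]
        exact bFrom_end forts (some i) r
      rw [hB, aOuter]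
      by_cases hc : i + 1 < forts.length
      · rw [dif_pos hc,
          aInner_zeros forts 1 one_ne_zero i (forts.length - (i + 1)) (i + 1) r
            (by omega) hzall,
          aInner_zeros forts (-1) (by norm_num) i (forts.length - (i + 1)) (i + 1) r
            (by omega) hzall,
          ite_self, ite_self]
        rw [aOuter_skip forts forts.length le_rfl (forts.length - (i + 1)) (i + 1) r
          (by omega) (by omega) hzall]
        rw [aOuter, dif_neg (by omega)]
      · rw [dif_neg hc]

-- ===== VERDICT (by name: the statement is the Claim_ definition above) =====
theorem captureForts_spec : Claim_equal_captureForts := by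
  intro forts _
  unfold Spec_captureForts captureForts captureForts_alt
  by_cases hex : ∃ j, j < forts.length ∧ forts.getD j 0 ≠ 0
  · have hspec := Nat.find_spec hex
    obtain ⟨hjlen, hjnz⟩ := hspec
    have hz : ∀ k, 0 ≤ k → k < Nat.find hex → forts.getD k 0 = 0 := by
      intro k _ hk2
      by_contra hne
      exact Nat.find_min hex hk2 ⟨by omega, hne⟩
    set j := Nat.find hex with hjdef
    rw [aOuter_skip forts j (by omega) j 0 0 (by omega) (by omega) hz]
    rw [bFrom_skip forts j (by omega) j 0 none 0 (by omega) (by omega) hz]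
    rw [bFrom.eq_def, dif_pos hjlen, if_pos hjnz]
    exact main_corr forts (forts.length - j) j 0 (by omega) hjlen hjnz
  · push_neg at hex
    rw [aOuter_skip forts forts.length le_rfl forts.length 0 0 (by omega) (by omega)
      (fun k _ hk2 => hex k hk2)]
    rw [bFrom_skip forts forts.length le_rfl forts.length 0 none 0 (by omega) (by omega)
      (fun k _ hk2 => hex k hk2)]
    rw [aOuter, dif_neg (by omega), bFrom_end]
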